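-- pv_equiv track=rewrite | github.com/mjormotor/backup_breadcrumb | path.py | rstrippath
-- ===== SOURCE A (Python) =====
-- def rstrippath(file_path):
-- 	index = len(file_path)
-- 	while index > 0:
-- 		letter = file_path[index - 1]
-- 		if letter == "/" or letter == "\\":
-- 			index -= 1
-- 			continue
-- 		return file_path[:index]
-- 	return file_path
-- ===== SOURCE B (Python) =====
-- def rstrippath(file_path):
-- 	last = -1
-- 	for i, c in enumerate(file_path):
-- 		if c != "/" and c != "\\":
-- 			last = i
-- 	if last == -1:
-- 		return file_path
-- 	return file_path[:last + 1]
-- ===== Notes on version B (the rewrite author's own statement) =====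
-- stated objective: alternative
-- what changed: B replaces A's backward while-loop (scanning from the end and returning at the first non-separator) with a single forward pass that tracks the index of the last non-separator character, then slices once after the loop.
import Mathlib
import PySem

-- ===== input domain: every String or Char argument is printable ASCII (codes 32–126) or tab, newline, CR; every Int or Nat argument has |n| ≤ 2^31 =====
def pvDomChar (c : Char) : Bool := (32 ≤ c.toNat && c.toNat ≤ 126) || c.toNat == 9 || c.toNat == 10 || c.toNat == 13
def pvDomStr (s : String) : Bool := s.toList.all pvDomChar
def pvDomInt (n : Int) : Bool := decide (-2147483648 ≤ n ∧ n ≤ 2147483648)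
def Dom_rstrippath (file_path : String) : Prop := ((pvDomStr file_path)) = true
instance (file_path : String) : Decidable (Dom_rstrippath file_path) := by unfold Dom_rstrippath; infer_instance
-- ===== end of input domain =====

-- B replaces A's backward while-loop with a single forward pass that tracks the
-- last non-separator index; same return value on every string (alternative decomposition).

-- ===== PORT A =====
-- A's while-loop: index counts down from len(file_path); at the first
-- non-separator it returns file_path[:index]; falls through to file_path.
def rstrippathLoop (cs : List Char) : Nat → String
  | 0 => String.ofList cs
  | n + 1 =>
    let letter := cs.getD n ' '   -- file_path[index-1]; the index is always in range here
    if letter = '/' ∨ letter = '\\' then rstrippathLoop cs n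
    else String.ofList (cs.take (n + 1))   -- file_path[:index], 0 ≤ index ≤ len: exact

def rstrippath (file_path : String) : String :=
  rstrippathLoop file_path.toList file_path.toList.length

-- ===== PORT B =====
def rstrippath_alt (file_path : String) : String :=
  let cs := file_path.toList
  let last : Int := (PySem.List.enumerate cs).foldl
    (fun acc p => if p.2 ≠ '/' ∧ p.2 ≠ '\\' then p.1 else acc) (-1)
  if last = -1 then file_path
  else String.ofList (cs.take (last + 1).toNat)   -- file_path[:last+1], 1 ≤ last+1 ≤ len: exact

-- ===== PRECONDITION & SPEC =====
def Spec_rstrippath (file_path : String) (out : String) : Prop := out = rstrippath_alt file_path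
instance (file_path : String) (out : String) : Decidable (Spec_rstrippath file_path out) := by unfold Spec_rstrippath; infer_instance

-- ===== CLAIM (what is proved, stated in full; the proofs are below) =====
def Claim_equal_rstrippath : Prop := ∀ (file_path : String), Dom_rstrippath file_path → Spec_rstrippath file_path (rstrippath file_path)

-- ===== LEMMAS AND PROOFS =====

/-- Separator predicate (proof-side helper). -/
def pvSep (c : Char) : Bool := c = '/' || c = '\\'

/-- A's loop computes: the original string if the first `n` chars are all
separators, else the first `n` chars with trailing separators removed. -/
theorem rstrippathLoop_eq (cs : List Char) :
    ∀ n, n ≤ cs.length →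
      rstrippathLoop cs n =
        if (cs.take n).all pvSep then String.ofList cs
        else String.ofList ((cs.take n).rdropWhile pvSep) := by
  intro n
  induction n with
  | zero => intro _; simp [rstrippathLoop]
  | succ n ih =>
    intro hle
    have hn : n < cs.length := Nat.lt_of_succ_le hle
    have htake : cs.take (n + 1) = cs.take n ++ [cs[n]] :=
      List.take_succ_eq_append_getElem hn
    have hget : cs.getD n ' ' = cs[n] := List.getD_eq_getElem cs ' ' hn
    by_cases hsep : cs[n] = '/' ∨ cs[n] = '\\'
    · have hs : pvSep cs[n] = true := by
        rcases hsep with h | h <;> simp [pvSep, h]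
      have hstep : rstrippathLoop cs (n + 1) = rstrippathLoop cs n := by
        simp only [rstrippathLoop, hget]
        rw [if_pos hsep]
      rw [hstep, ih (Nat.le_of_lt hn), htake, List.all_append,
        List.rdropWhile_concat_pos pvSep (cs.take n) cs[n] hs]
      simp [hs]
    · have hs : pvSep cs[n] = false := by
        simp only [pvSep, Bool.or_eq_false_iff, decide_eq_false_iff_not]
        tauto
      have hstep : rstrippathLoop cs (n + 1) = String.ofList (cs.take (n + 1)) := by
        simp only [rstrippathLoop, hget]
        rw [if_neg hsep]
      rw [hstep, htake, List.all_append,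
        List.rdropWhile_concat_neg pvSep (cs.take n) cs[n] (by simp [hs])]
      simp [hs]

/-- B's fold computes −1 if every char is a separator, else
(length after removing trailing separators) − 1. -/
theorem foldLast_eq (cs : List Char) :
    (PySem.List.enumerate cs).foldl
        (fun acc p => if p.2 ≠ '/' ∧ p.2 ≠ '\\' then p.1 else acc) (-1) =
      if cs.all pvSep then (-1 : Int)
      else ((cs.rdropWhile pvSep).length : Int) - 1 := by
  induction cs using List.reverseRecOn with
  | nil => rw [PySem.List.enumerate_nil]; simp
  | append_singleton cs c ih =>
    rw [PySem.List.enumerate_append, List.foldl_append, ih,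
      PySem.List.enumerate_cons, PySem.List.enumerate_nil,
      List.foldl_cons, List.foldl_nil]
    by_cases hsep : c = '/' ∨ c = '\\'
    · have hs : pvSep c = true := by rcases hsep with h | h <;> simp [pvSep, h]
      have hcond : ¬ (c ≠ '/' ∧ c ≠ '\\') := by tauto
      rw [if_neg hcond, List.all_append,
        List.rdropWhile_concat_pos pvSep cs c hs]
      simp [hs]
    · have hcond : c ≠ '/' ∧ c ≠ '\\' := by tauto
      have hs : pvSep c = false := by
        simp only [pvSep, Bool.or_eq_false_iff, decide_eq_false_iff_not]
        exact hcond
      rw [if_pos hcond, List.all_append,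
        List.rdropWhile_concat_neg pvSep cs c (by simp [hs])]
      simp [hs]

-- ===== VERDICT (by name: the statement is the Claim_ definition above) =====
theorem rstrippath_spec : Claim_equal_rstrippath := by
  intro s _
  unfold Spec_rstrippath rstrippath rstrippath_alt
  dsimp only
  rw [rstrippathLoop_eq _ _ (le_refl _), List.take_length, foldLast_eq]
  by_cases hall : s.toList.all pvSep
  · rw [if_pos hall, if_pos hall, if_pos rfl, String.ofList_toList]
  · have hne : s.toList.rdropWhile pvSep ≠ [] := by
      intro h
      rw [List.rdropWhile_eq_nil_iff] at h
      exact hall (List.all_eq_true.mpr fun x hx => h x hx)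
    have hlen : 0 < (s.toList.rdropWhile pvSep).length := List.length_pos_iff.mpr hne
    have hnz : ((s.toList.rdropWhile pvSep).length : Int) - 1 ≠ -1 := by omega
    rw [if_neg hall, if_neg hall, if_neg hnz]
    have htn : (((s.toList.rdropWhile pvSep).length : Int) - 1 + 1).toNat
        = (s.toList.rdropWhile pvSep).length := by omega
    rw [htn]
    congr 1
    exact List.prefix_iff_eq_take.mp (List.rdropWhile_prefix pvSep s.toList)
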